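-- pv_equiv track=rewrite | github.com/lixiaochen-code/python | python/实验报告/实验八/demo.py | climbStairs2
-- ===== SOURCE A (Python) =====
-- def climbStairs2(n):
--     #递归法
--     first3 = {1:1, 2:2, 3:4}
--     if n in first3.keys():
--         return first3[n]
--     else:
--         return climbStairs2(n-1) + \
--         climbStairs2(n-2) + \
--         climbStairs2(n-3)
-- ===== SOURCE B (Python) =====
-- def climbStairs2(n):
--     # Bottom-up DP: keep only the last three tribonacci values.
--     a, b, c = 0, 0, 1
--     for _ in range(n):
--         a, b, c = b, c, a + b + c
--     return c
-- ===== Notes on version B (the rewrite author's own statement) =====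
-- stated objective: faster
-- what changed: Replaced the naive triple-branch recursion with a bottom-up loop carrying only the last three tribonacci values; intended as asymptotically faster — a timing run could not confirm a ratio because A does not finish on the measured sizes.
-- outside the precondition, e.g. on climbStairs2(0): A raises RecursionError, B returns 1
import Mathlib
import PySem

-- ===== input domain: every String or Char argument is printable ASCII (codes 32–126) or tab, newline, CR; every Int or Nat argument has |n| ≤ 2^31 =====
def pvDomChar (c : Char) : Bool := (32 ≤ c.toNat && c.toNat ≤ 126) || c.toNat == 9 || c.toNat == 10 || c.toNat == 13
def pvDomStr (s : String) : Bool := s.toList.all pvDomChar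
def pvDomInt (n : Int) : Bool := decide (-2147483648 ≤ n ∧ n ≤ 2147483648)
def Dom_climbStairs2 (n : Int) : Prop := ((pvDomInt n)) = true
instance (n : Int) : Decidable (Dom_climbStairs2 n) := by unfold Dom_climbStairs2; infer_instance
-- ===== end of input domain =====

-- B replaces A's triple recursion by a bottom-up loop carrying the last three values; intended as asymptotically faster (a timing run could not confirm a ratio: A does not finish on the measured sizes).

-- ===== PORT A =====
-- A's recursion on an Int argument; `fuel` only makes it total (Python diverges for n ≤ 0).
def climbStairs2A (fuel : Nat) (n : Int) : Int :=
  match fuel with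
  | 0 => 0
  | f + 1 =>
    if n = 1 then 1
    else if n = 2 then 2
    else if n = 3 then 4
    else climbStairs2A f (n - 1) + climbStairs2A f (n - 2) + climbStairs2A f (n - 3)

def climbStairs2 (n : Int) : Int := climbStairs2A n.toNat n

-- ===== PORT B =====
-- the loop `for _ in range(n): a,b,c = b,c,a+b+c`
def climbStairs2B : Nat → Int × Int × Int → Int × Int × Int
  | 0, s => s
  | k + 1, (a, b, c) => climbStairs2B k (b, c, a + b + c)

def climbStairs2_alt (n : Int) : Int := (climbStairs2B n.toNat (0, 0, 1)).2.2

-- ===== PRECONDITION & SPEC =====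
-- Pre_ excludes n ≤ 0, where the Python A recurses forever (RecursionError).
def Pre_climbStairs2 (n : Int) : Prop := 1 ≤ n
instance (n : Int) : Decidable (Pre_climbStairs2 n) := by unfold Pre_climbStairs2; infer_instance
def pvWitness_climbStairs2 : Int := 5

def Spec_climbStairs2 (n : Int) (out : Int) : Prop := out = climbStairs2_alt n
instance (n : Int) (out : Int) : Decidable (Spec_climbStairs2 n out) := by unfold Spec_climbStairs2; infer_instance

-- ===== CLAIM (what is proved, stated in full; the proofs are below) =====
def Claim_equal_climbStairs2 : Prop := ∀ (n : Int), Dom_climbStairs2 n → Pre_climbStairs2 n → Spec_climbStairs2 n (climbStairs2 n)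

-- ===== LEMMAS AND PROOFS =====

-- reference sequence: u 0 = 0, u 1 = 0, u 2 = 1, u (m+3) = u m + u (m+1) + u (m+2)
def pvU : Nat → Int
  | 0 => 0
  | 1 => 0
  | 2 => 1
  | m + 3 => pvU m + pvU (m + 1) + pvU (m + 2)

lemma climbB_invariant (k : Nat) : ∀ (i : Nat),
    climbStairs2B k (pvU i, pvU (i + 1), pvU (i + 2)) =
      (pvU (i + k), pvU (i + k + 1), pvU (i + k + 2)) := by
  induction k with
  | zero => intro i; simp [climbStairs2B]
  | succ k ih =>
    intro i
    have h3 : pvU i + pvU (i + 1) + pvU (i + 2) = pvU (i + 3) := rfl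
    rw [climbStairs2B, h3]
    have h := ih (i + 1)
    have a1 : i + 1 + k = i + (k + 1) := by omega
    rw [a1] at h
    exact h

lemma alt_eq_u (n : Int) : climbStairs2_alt n = pvU (n.toNat + 2) := by
  have h := climbB_invariant n.toNat 0
  have h0 : pvU 0 = 0 := rfl
  have h1 : pvU 1 = 0 := rfl
  have h2 : pvU 2 = 1 := rfl
  rw [h0, h1, h2] at h
  simp only [Nat.zero_add] at h
  simp [climbStairs2_alt, h]

lemma climbA_eq_u : ∀ (f : Nat) (n : Int), 1 ≤ n → n.toNat ≤ f →
    climbStairs2A f n = pvU (n.toNat + 2) := by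
  intro f
  induction f with
  | zero => intro n h1 h2; omega
  | succ f ih =>
    intro n h1 h2
    rw [climbStairs2A]
    by_cases e1 : n = 1
    · subst e1; simp [pvU]
    · by_cases e2 : n = 2
      · subst e2; simp [pvU]
      · by_cases e3 : n = 3
        · subst e3
          norm_num
          decide
        · simp [e1, e2, e3]
          have h4 : 4 ≤ n := by omega
          have r1 := ih (n - 1) (by omega) (by omega)
          have r2 := ih (n - 2) (by omega) (by omega)
          have r3 := ih (n - 3) (by omega) (by omega)
          rw [r1, r2, r3]
          have t1 : (n - 1).toNat + 2 = n.toNat + 1 := by omega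
          have t2 : (n - 2).toNat + 2 = n.toNat := by omega
          have t3 : (n - 3).toNat + 2 = n.toNat - 1 := by omega
          have hm : n.toNat + 2 = (n.toNat - 1) + 3 := by omega
          rw [t1, t2, t3, hm, pvU]
          have h1' : n.toNat - 1 + 1 = n.toNat := by omega
          have h2' : n.toNat - 1 + 2 = n.toNat + 1 := by omega
          rw [h1', h2']
          ring

-- ===== VERDICT (by name: the statement is the Claim_ definition above) =====
theorem climbStairs2_spec : Claim_equal_climbStairs2 := by
  intro n _ hpre
  unfold Spec_climbStairs2 climbStairs2
  rw [climbA_eq_u n.toNat n hpre (le_refl _), alt_eq_u]
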